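-- pv_equiv track=rewrite | github.com/idoneam/Canary | cogs/utils/poetry_toolz.py | make_rev_gen_dict
-- ===== SOURCE A (Python) =====
-- from typing import Dict, List, Tuple
--
-- def make_rev_gen_dict(ord_word_list: List[str]) -> Dict[str, List[str]]:
--     """
--     Returns a dict containing as keys words and as values a list of words
--     that preceded instances of the key word.
--     Takes as argument an ordered list of words from some text.
--     """
--     prv_word_map: Dict[str, List[str]] = {}
--     for index, word in enumerate(ord_word_list):
--         if word not in prv_word_map:
--             prv_word_map[word] = []
--         if index > 0:
--             prv_word_map[word].append(ord_word_list[index - 1])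
--     return prv_word_map
-- ===== SOURCE B (Python) =====
-- from typing import Dict, List
--
-- def make_rev_gen_dict(ord_word_list: List[str]) -> Dict[str, List[str]]:
--     return {w: [ord_word_list[i - 1]
--                 for i in range(1, len(ord_word_list))
--                 if ord_word_list[i] == w]
--             for w in dict.fromkeys(ord_word_list)}
-- ===== Notes on version B (the rewrite author's own statement) =====
-- stated objective: alternative
-- what changed: Replaces A's single streaming pass that mutates per-key lists with a per-key gather: a dict comprehension over the distinct words in first-occurrence order, where each word's predecessor list is computed by its own scan of the index range; trades A's O(n) single pass for an O(n*k) gather with no mutation.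
import Mathlib
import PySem

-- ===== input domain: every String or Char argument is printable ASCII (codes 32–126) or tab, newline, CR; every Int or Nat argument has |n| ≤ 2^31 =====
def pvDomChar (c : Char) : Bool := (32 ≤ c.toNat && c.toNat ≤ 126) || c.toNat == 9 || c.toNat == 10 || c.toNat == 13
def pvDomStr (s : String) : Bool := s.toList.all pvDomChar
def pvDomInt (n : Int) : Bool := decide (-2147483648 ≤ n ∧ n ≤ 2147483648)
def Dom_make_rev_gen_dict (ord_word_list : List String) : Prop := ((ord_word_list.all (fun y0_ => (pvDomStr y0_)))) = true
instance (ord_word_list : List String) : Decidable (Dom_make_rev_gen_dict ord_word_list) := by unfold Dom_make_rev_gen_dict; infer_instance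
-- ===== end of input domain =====

-- B replaces A's single streaming pass (mutating per-key lists) by a per-key gather: a dict
-- comprehension over the distinct words in first-occurrence order, each word's predecessor list
-- computed by its own scan of the index range; same return value, no claim of speed.

-- ===== PORT A =====
-- `ord_word_list[index - 1]` is only reached with index > 0, so the index is always in range and
-- pyGet? is always `some`; the `.getD ""` default is unreachable.
def make_rev_gen_dict (ord_word_list : List String) : List (String × List String) :=
  ((PySem.List.enumerate ord_word_list 0).foldl
    (fun d p =>
      let d1 := if d.contains p.2 then d else d.insert p.2 ([] : List String)
      if 0 < p.1 then
        d1.modify p.2 [] (fun v => v ++ [(PySem.List.pyGet? ord_word_list (p.1 - 1)).getD ""])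
      else d1)
    PySem.Dict.empty).items

-- ===== PORT B =====
-- the inner comprehension [lst[i-1] for i in range(1, len(lst)) if lst[i] == w];
-- every index used is in range, so pyGetD's default "" is unreachable.
def predsB (l : List String) (w : String) : List String :=
  ((PySem.List.pyRange 1 (l.length : Int) 1).filter
      (fun i => PySem.List.pyGetD l i "" == w)).map
    (fun i => PySem.List.pyGetD l (i - 1) "")

-- dict.fromkeys(lst) iterates the distinct words in first-occurrence order (PySem.List.dedup);
-- the comprehension's keys are therefore distinct, so the dict's items list IS this map.
def make_rev_gen_dict_alt (ord_word_list : List String) : List (String × List String) :=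
  (PySem.List.dedup ord_word_list).map (fun w => (w, predsB ord_word_list w))

-- ===== PRECONDITION & SPEC =====
def Spec_make_rev_gen_dict (ord_word_list : List String) (out : List (String × List String)) : Prop := out = make_rev_gen_dict_alt ord_word_list
instance (ord_word_list : List String) (out : List (String × List String)) : Decidable (Spec_make_rev_gen_dict ord_word_list out) := by unfold Spec_make_rev_gen_dict; infer_instance

-- ===== CLAIM (what is proved, stated in full; the proofs are below) =====
def Claim_equal_make_rev_gen_dict : Prop := ∀ (ord_word_list : List String), Dom_make_rev_gen_dict ord_word_list → Spec_make_rev_gen_dict ord_word_list (make_rev_gen_dict ord_word_list)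

-- ===== LEMMAS AND PROOFS =====

-- A's dict-building fold, named for the proofs (definitionally the fold inside make_rev_gen_dict).
def dictA (l : List String) : PySem.Dict String (List String) :=
  (PySem.List.enumerate l 0).foldl
    (fun d p =>
      let d1 := if d.contains p.2 then d else d.insert p.2 ([] : List String)
      if 0 < p.1 then
        d1.modify p.2 [] (fun v => v ++ [(PySem.List.pyGet? l (p.1 - 1)).getD ""])
      else d1)
    PySem.Dict.empty

-- an if-based setdefault is setdefault
theorem ite_insert_eq_setdefault {κ ν : Type} [BEq κ] (d : PySem.Dict κ ν) (w : κ) (v : ν) :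
    (if d.contains w then d else d.insert w v) = d.setdefault w v := by
  by_cases h : d.contains w = true
  · simp [h, PySem.Dict.setdefault_of_contains d v h]
  · simp at h
    simp [h, PySem.Dict.setdefault_of_not_contains d v h]

theorem dictA_snoc (l : List String) (w : String) :
    dictA (l ++ [w]) =
      (match l.getLast? with
       | none => (dictA l).setdefault w []
       | some x => ((dictA l).setdefault w []).modify w [] (fun v => v ++ [x])) := by
  unfold dictA
  rw [PySem.List.enumerate_append, List.foldl_append]
  have hpre : (PySem.List.enumerate l 0).foldl
      (fun d p =>
        let d1 := if d.contains p.2 then d else d.insert p.2 ([] : List String)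
        if 0 < p.1 then
          d1.modify p.2 [] (fun v => v ++ [(PySem.List.pyGet? (l ++ [w]) (p.1 - 1)).getD ""])
        else d1) PySem.Dict.empty =
      (PySem.List.enumerate l 0).foldl
      (fun d p =>
        let d1 := if d.contains p.2 then d else d.insert p.2 ([] : List String)
        if 0 < p.1 then
          d1.modify p.2 [] (fun v => v ++ [(PySem.List.pyGet? l (p.1 - 1)).getD ""])
        else d1) PySem.Dict.empty := by
    apply PySem.List.foldl_congr_mem
    intro acc p hp
    rcases (PySem.List.mem_enumerate_iff l 0 p).mp hp with ⟨k, hk, rfl⟩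
    simp only [zero_add]
    by_cases hk0 : 0 < (k : Int)
    · have hk1 : (k : Int) - 1 = ((k - 1 : Nat) : Int) := by omega
      rw [hk1, PySem.List.pyGet?_natCast, PySem.List.pyGet?_natCast,
        List.getElem?_append_left (by omega)]
    · rw [if_neg hk0, if_neg hk0]
  rw [hpre]
  show (PySem.List.enumerate [w] (0 + ↑l.length)).foldl _ (dictA l) = _
  simp only [PySem.List.enumerate_cons, PySem.List.enumerate_nil, List.foldl_cons, List.foldl_nil,
    zero_add]
  cases hl : l.getLast? with
  | none =>
    rw [List.getLast?_eq_none_iff] at hl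
    subst hl
    simp [ite_insert_eq_setdefault]; rfl
  | some x =>
    have hne : l ≠ [] := by rintro rfl; simp at hl
    have hlen : 0 < (l.length : Int) := by
      have := List.length_pos_iff.mpr hne; omega
    simp only [hlen, if_pos]
    rw [ite_insert_eq_setdefault]
    have hidx : (l.length : Int) - 1 = ((l.length - 1 : Nat) : Int) := by
      have := List.length_pos_iff.mpr hne; omega
    rw [hidx, PySem.List.pyGet?_natCast,
      List.getElem?_append_left (by have := List.length_pos_iff.mpr hne; omega)]
    rw [← List.getLast?_eq_getElem?, hl]
    rfl

theorem items_modify_of_contains (d : PySem.Dict String (List String)) (w : String)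
    (f : List String → List String) (h : d.contains w = true) :
    (d.modify w [] f).items =
      d.items.map (fun p => if p.1 == w then (w, f (d.getD w [])) else p) := by
  unfold PySem.Dict.modify
  rw [PySem.Dict.items_insert_of_contains _ _ h]

theorem predsB_not_mem (l : List String) (w : String) (hw : w ∉ l) : predsB l w = [] := by
  unfold predsB
  have h : ∀ i ∈ PySem.List.pyRange 1 (l.length : Int) 1,
      ¬ (PySem.List.pyGetD l i "" == w) = true := by
    intro i hi hc
    obtain ⟨h1, h2⟩ := PySem.List.mem_pyRange_one.mp hi
    have hmem : PySem.List.pyGetD l i "" ∈ l :=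
      PySem.List.pyGetD_mem l "" (by simp [PySem.Raise.InRange]; omega)
    rw [beq_iff_eq] at hc
    exact hw (hc ▸ hmem)
  rw [List.filter_eq_nil_iff.mpr h]
  rfl

theorem predsB_snoc (l : List String) (w v : String) :
    predsB (l ++ [w]) v =
      predsB l v ++ (match l.getLast? with
        | none => []
        | some x => if w = v then [x] else []) := by
  cases hl : l.getLast? with
  | none =>
    rw [List.getLast?_eq_none_iff] at hl
    subst hl
    simp [predsB, PySem.List.pyRange_one_eq_nil]
  | some x =>
    have hne : l ≠ [] := by rintro rfl; simp at hl
    have hpos : 0 < l.length := List.length_pos_iff.mpr hne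
    unfold predsB
    have hlen : (((l ++ [w]).length : Nat) : Int) = (l.length : Int) + 1 := by simp
    rw [hlen, PySem.List.pyRange_one_succ_right (by omega : (1:Int) ≤ (l.length : Int)),
      List.filter_append, List.map_append]
    congr 1
    · -- left part: indices below l.length read from l
      have hfil : ∀ i ∈ PySem.List.pyRange 1 (l.length : Int) 1,
          (PySem.List.pyGetD (l ++ [w]) i "" == v) = (PySem.List.pyGetD l i "" == v) := by
        intro i hi
        obtain ⟨h1, h2⟩ := PySem.List.mem_pyRange_one.mp hi
        rw [PySem.List.pyGetD_eq_getElem (l ++ [w]) "" (by omega) (by simp; omega),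
          PySem.List.pyGetD_eq_getElem l "" (by omega) (by omega),
          List.getElem_append_left (by omega)]
      rw [List.filter_congr hfil]
      apply List.map_congr_left
      intro i hi
      have hi' := List.mem_filter.mp hi
      obtain ⟨h1, h2⟩ := PySem.List.mem_pyRange_one.mp hi'.1
      rw [PySem.List.pyGetD_eq_getElem (l ++ [w]) "" (by omega) (by simp; omega),
        PySem.List.pyGetD_eq_getElem l "" (by omega) (by omega),
        List.getElem_append_left (by omega)]
    · -- the new index l.length reads w and its predecessor is l's last element
      have hget : PySem.List.pyGetD (l ++ [w]) (l.length : Int) "" = w := by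
        rw [PySem.List.pyGetD_natCast]
        simp [List.getD]
      have hprev : PySem.List.pyGetD (l ++ [w]) ((l.length : Int) - 1) "" = x := by
        have hcast : ((l.length : Int)) - 1 = (((l.length - 1 : Nat) : Nat) : Int) := by omega
        rw [hcast, PySem.List.pyGetD_natCast, List.getD,
          List.getElem?_append_left (by omega), ← List.getLast?_eq_getElem?, hl]
        rfl
      simp only [List.filter_cons, List.filter_nil, hget]
      by_cases hwv : w = v
      · subst hwv
        simp [hprev]
      · simp [hwv, (by simpa using hwv : (w == v) = false)]

theorem itemsA_eq (l : List String) :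
    (dictA l).items = (PySem.List.dedup l).map (fun w => (w, predsB l w)) := by
  induction l using List.reverseRecOn with
  | nil => rfl
  | append_singleton l w ih =>
    have hkeys : (dictA l).keys = PySem.List.dedup l := by
      simp only [PySem.Dict.keys, ih, List.map_map]
      exact (List.map_congr_left (fun a _ => rfl)).trans (List.map_id _)
    have hnodup : (dictA l).keys.Nodup := by
      rw [hkeys]; exact PySem.List.nodup_dedup l
    have hcont : ∀ v, ((dictA l).contains v = true) ↔ v ∈ l := by
      intro v
      rw [PySem.Dict.contains_iff_mem_keys, hkeys]
      exact PySem.List.mem_dedup l v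
    rw [dictA_snoc]
    cases hl : l.getLast? with
    | none =>
      rw [List.getLast?_eq_none_iff] at hl
      subst hl
      rw [show dictA [] = PySem.Dict.empty from rfl,
        PySem.Dict.setdefault_of_not_contains _ _ (PySem.Dict.contains_empty w),
        PySem.Dict.items_insert_of_not_contains _ _ (PySem.Dict.contains_empty w)]
      simp [predsB, PySem.List.pyRange_one_eq_nil]
      rfl
    | some x =>
      have hne : l ≠ [] := by rintro rfl; simp at hl
      by_cases hw : w ∈ l
      · rw [PySem.Dict.setdefault_of_contains _ _ ((hcont w).mpr hw),
          items_modify_of_contains _ _ _ ((hcont w).mpr hw)]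
        have hgetD : (dictA l).getD w [] = predsB l w := by
          apply PySem.Dict.getD_of_mem_items
          · rw [ih]
            exact List.mem_map_of_mem ((PySem.List.mem_dedup l w).mpr hw)
          · exact hnodup
        rw [hgetD, ih]
        have hded : PySem.List.dedup (l ++ [w]) = PySem.List.dedup l := by
          simp [PySem.Set.ofList_append_singleton,
            PySem.Set.add_of_mem ((PySem.Set.mem_ofList l w).mpr hw)]
        rw [hded, List.map_map]
        apply List.map_congr_left
        intro v hv
        simp only [Function.comp_apply]
        rw [predsB_snoc, hl]
        by_cases hvw : v = w
        · subst hvw; simp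
        · have h1 : (v == w) = false := by simpa using hvw
          have h2 : ¬ (w = v) := fun h => hvw h.symm
          simp [h1, h2]
      · have hcw : (dictA l).contains w = false :=
          Bool.eq_false_iff.mpr (fun h => hw ((hcont w).mp h))
        rw [PySem.Dict.setdefault_of_not_contains _ _ hcw,
          items_modify_of_contains _ _ _ (PySem.Dict.contains_insert_self _ _ _),
          PySem.Dict.items_insert_of_not_contains _ _ hcw,
          PySem.Dict.getD_insert_self, List.map_append]
        have hded : PySem.List.dedup (l ++ [w]) = PySem.List.dedup l ++ [w] := by
          simp [PySem.Set.ofList_append_singleton,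
            PySem.Set.add_of_not_mem (fun h => hw ((PySem.Set.mem_ofList l w).mp h))]
        rw [hded, List.map_append]
        congr 1
        · rw [ih, List.map_map]
          apply List.map_congr_left
          intro v hv
          have hvl : v ∈ l := (PySem.List.mem_dedup l v).mp hv
          have hvw' : v ≠ w := fun h => hw (h ▸ hvl)
          have hvw : (v == w) = false := by simpa using hvw'
          simp only [Function.comp_apply, hvw]
          rw [predsB_snoc, hl]
          have h2 : ¬ (w = v) := fun h => hw (h ▸ hvl)
          simp [h2]
        · simp [predsB_snoc, hl, predsB_not_mem l w hw]

-- ===== VERDICT (by name: the statement is the Claim_ definition above) =====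
theorem make_rev_gen_dict_spec : Claim_equal_make_rev_gen_dict := by
  intro l _
  show make_rev_gen_dict l = make_rev_gen_dict_alt l
  exact itemsA_eq l
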